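-- pv_equiv track=rewrite | github.com/danpovey/kaldi10feat | kaldi10feat/window.py | get_num_frames
-- ===== SOURCE A (Python) =====
-- def first_sample_of_frame(frame,
--                           frame_shift_in_samples,
--                           window_size_in_samples):
--     """
--     Returns the sample-index of the first sample of the frame with index
--     'frame'.  Caution: this may be negative; we treat out-of-range samples
--     as zero.
--     Analogous to with kaldi10's FirstSampleOfFrame in feat/feature-window.h
--
--     Args:
--         frame (int): The frame index >= 0.
--         frame_shift_in_samples (int) The frame shift in samples
--         window_size_in_samples (int)  The window size in samples
--     Returns:
--         int: The first sample of this frame (caution: may be negative).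
--     """
--     midpoint_of_frame = frame_shift_in_samples * frame + (frame_shift_in_samples // 2)
--     beginning_of_frame = midpoint_of_frame - window_size_in_samples // 2
--     assert isinstance(beginning_of_frame, int)  # indirectly check inputs were
--                                                 # int.
--     return beginning_of_frame
--
-- def get_num_frames(num_samples,
--                    frame_shift_in_samples,
--                    window_size_in_samples,
--                    flush = True):
--     """
--     Returns the number of frames we'll extract from a signal of specified length
--     and specified frame shift and window size.  (The window size only makes a difference
--     if flush == false, which is unusual.)
--     Analogous to Kaldi10's NumFrames() in feat/feature-window.h
--
--     Args:
--         num_samples (int)  Number of samples in the signal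
--         frame_shift_in_samples (int)  Frame shift between samples
--         window_size_in_samples (int)  Length of window
--         flush (bool)          True in the normal case when we are processing the
--                      whole signal at once.  May be set to false to suppress final
--                      samples that overlap the signal boundary.
--     Returns:
--         int: The number of frames
--     """
--     assert(isinstance(num_samples, int) and isinstance(frame_shift_in_samples, int) and
--            isinstance(window_size_in_samples, int) and isinstance(flush, bool))
--
--     num_frames = (num_samples + (frame_shift_in_samples // 2)) // frame_shift_in_samples
--     if not isinstance(num_frames, int):
--         raise ValueError("expected integer num_frames")
--     if flush:
--         return num_frames
--     else:
--         end_sample_of_last_frame = (first_sample_of_frame(num_frames - 1,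
--                                                          frame_shift_in_samples,
--                                                          window_size_in_samples) +
--                                     window_size_in_samples)
--         while num_frames > 0 and end_sample_of_last_frame > num_samples:
--             num_frames -= 1
--             end_sample_of_last_frame -= frame_shift_in_samples
--         return num_frames
-- ===== SOURCE B (Python) =====
-- def get_num_frames(num_samples,
--                    frame_shift_in_samples,
--                    window_size_in_samples,
--                    flush = True):
--     assert(isinstance(num_samples, int) and isinstance(frame_shift_in_samples, int) and
--            isinstance(window_size_in_samples, int) and isinstance(flush, bool))
--     num_frames = (num_samples + frame_shift_in_samples // 2) // frame_shift_in_samples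
--     if flush:
--         return num_frames
--     # Frame f ends at sample frame_shift*f + frame_shift//2 - window//2 + window,
--     # which is affine in f, so the last frame fitting inside the signal is found
--     # with one floor division; the count is clamped to [0, num_frames].
--     end_of_frame0 = (frame_shift_in_samples // 2 - window_size_in_samples // 2
--                      + window_size_in_samples)
--     last_fitting = (num_samples - end_of_frame0) // frame_shift_in_samples
--     return max(0, min(num_frames, last_fitting + 1))
-- ===== Notes on version B (the rewrite author's own statement) =====
-- stated objective: simpler
-- what changed: The flush=False decrement loop is replaced by solving the affine inequality end(f) = shift*f + c <= num_samples with one floor division, clamping the count into [0, num_frames]; Pre_ excludes non-positive frame shifts, outside the task's natural domain (shift 0 raises ZeroDivisionError in A, a negative shift is a nonsensical frame step).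
-- intended difference: With flush=False and num_samples so small (negative) that the raw frame count is negative, A returns that negative count unchanged; B returns 0, the intended value since a number of frames cannot be negative. — e.g. on get_num_frames(-10, 2, 3, false): A returns -5, B returns 0
-- outside the precondition, e.g. on get_num_frames(10, -3, 5, False): A returns -3, B returns 0
import Mathlib
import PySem

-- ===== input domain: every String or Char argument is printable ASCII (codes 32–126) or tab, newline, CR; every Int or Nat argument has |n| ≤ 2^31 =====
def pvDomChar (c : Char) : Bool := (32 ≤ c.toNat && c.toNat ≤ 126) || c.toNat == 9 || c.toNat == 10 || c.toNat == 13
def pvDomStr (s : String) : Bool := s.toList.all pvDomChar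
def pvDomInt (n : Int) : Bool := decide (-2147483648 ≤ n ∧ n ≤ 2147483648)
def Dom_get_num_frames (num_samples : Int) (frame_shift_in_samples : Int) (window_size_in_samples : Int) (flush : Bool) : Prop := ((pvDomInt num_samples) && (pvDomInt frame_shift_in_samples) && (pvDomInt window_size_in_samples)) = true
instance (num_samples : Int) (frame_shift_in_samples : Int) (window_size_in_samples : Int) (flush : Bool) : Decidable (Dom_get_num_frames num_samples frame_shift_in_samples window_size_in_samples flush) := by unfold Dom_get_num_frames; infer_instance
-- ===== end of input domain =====

-- B replaces A's flush=False decrement loop by one floor division solving the affine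
-- inequality for the last fitting frame (clamped into [0, num_frames]).

-- ===== PORT A =====
def first_sample_of_frame (frame : Int) (frame_shift_in_samples : Int) (window_size_in_samples : Int) : Int :=
  let midpoint_of_frame := frame_shift_in_samples * frame + PySem.Int.floordiv frame_shift_in_samples 2
  let beginning_of_frame := midpoint_of_frame - PySem.Int.floordiv window_size_in_samples 2
  beginning_of_frame

-- A's 'while num_frames > 0 and end_sample_of_last_frame > num_samples' loop
def pvLoopA (num_samples : Int) (frame_shift_in_samples : Int) (num_frames : Int) (end_sample : Int) : Int :=
  if num_frames > 0 ∧ end_sample > num_samples then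
    pvLoopA num_samples frame_shift_in_samples (num_frames - 1) (end_sample - frame_shift_in_samples)
  else num_frames
termination_by num_frames.toNat
decreasing_by omega

def get_num_frames (num_samples : Int) (frame_shift_in_samples : Int) (window_size_in_samples : Int) (flush : Bool) : Int :=
  let num_frames := PySem.Int.floordiv (num_samples + PySem.Int.floordiv frame_shift_in_samples 2) frame_shift_in_samples
  if flush then num_frames
  else
    let end_sample_of_last_frame :=
      first_sample_of_frame (num_frames - 1) frame_shift_in_samples window_size_in_samples + window_size_in_samples
    pvLoopA num_samples frame_shift_in_samples num_frames end_sample_of_last_frame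

-- ===== PORT B =====
def get_num_frames_alt (num_samples : Int) (frame_shift_in_samples : Int) (window_size_in_samples : Int) (flush : Bool) : Int :=
  let num_frames := PySem.Int.floordiv (num_samples + PySem.Int.floordiv frame_shift_in_samples 2) frame_shift_in_samples
  if flush then num_frames
  else
    let end_of_frame0 := PySem.Int.floordiv frame_shift_in_samples 2
      - PySem.Int.floordiv window_size_in_samples 2 + window_size_in_samples
    let last_fitting := PySem.Int.floordiv (num_samples - end_of_frame0) frame_shift_in_samples
    max 0 (min num_frames (last_fitting + 1))

-- ===== PRECONDITION & SPEC =====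
-- Pre_ restricts to positive frame shift, the task's natural domain: at shift 0 the
-- Python A raises ZeroDivisionError, and a negative frame shift is a nonsensical
-- frame step on which A's loop value is accidental.
def Pre_get_num_frames (num_samples : Int) (frame_shift_in_samples : Int) (window_size_in_samples : Int) (flush : Bool) : Prop :=
  0 < frame_shift_in_samples
instance (num_samples : Int) (frame_shift_in_samples : Int) (window_size_in_samples : Int) (flush : Bool) : Decidable (Pre_get_num_frames num_samples frame_shift_in_samples window_size_in_samples flush) := by unfold Pre_get_num_frames; infer_instance
def pvWitness_get_num_frames : Int × Int × Int × Bool := (100, 10, 25, false)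

-- With flush=False and num_samples so small (negative) that the raw frame count is
-- negative, A returns that negative count unchanged; B returns 0, the intended value
-- since a number of frames cannot be negative.
def D_get_num_frames (num_samples : Int) (frame_shift_in_samples : Int) (window_size_in_samples : Int) (flush : Bool) : Prop :=
  flush = false ∧ num_samples + PySem.Int.floordiv frame_shift_in_samples 2 < 0
instance (num_samples : Int) (frame_shift_in_samples : Int) (window_size_in_samples : Int) (flush : Bool) : Decidable (D_get_num_frames num_samples frame_shift_in_samples window_size_in_samples flush) := by unfold D_get_num_frames; infer_instance

def Spec_get_num_frames (num_samples : Int) (frame_shift_in_samples : Int) (window_size_in_samples : Int) (flush : Bool) (out : Int) : Prop := ¬ D_get_num_frames num_samples frame_shift_in_samples window_size_in_samples flush → out = get_num_frames_alt num_samples frame_shift_in_samples window_size_in_samples flush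
instance (num_samples : Int) (frame_shift_in_samples : Int) (window_size_in_samples : Int) (flush : Bool) (out : Int) : Decidable (Spec_get_num_frames num_samples frame_shift_in_samples window_size_in_samples flush out) := by unfold Spec_get_num_frames; infer_instance

def pvDiffWitness_get_num_frames : Int × Int × Int × Bool := (-10, 2, 3, false)
def pvDiffWitnessOut_get_num_frames : Int × Int := (-5, 0)

-- ===== CLAIM (what is proved, stated in full; the proofs are below) =====
def Claim_unchanged_get_num_frames : Prop := ∀ (num_samples : Int) (frame_shift_in_samples : Int) (window_size_in_samples : Int) (flush : Bool), Dom_get_num_frames num_samples frame_shift_in_samples window_size_in_samples flush → Pre_get_num_frames num_samples frame_shift_in_samples window_size_in_samples flush → Spec_get_num_frames num_samples frame_shift_in_samples window_size_in_samples flush (get_num_frames num_samples frame_shift_in_samples window_size_in_samples flush)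
def Claim_changed_get_num_frames : Prop := Dom_get_num_frames (pvDiffWitness_get_num_frames.1) (pvDiffWitness_get_num_frames.2.1) (pvDiffWitness_get_num_frames.2.2.1) (pvDiffWitness_get_num_frames.2.2.2) ∧ Pre_get_num_frames (pvDiffWitness_get_num_frames.1) (pvDiffWitness_get_num_frames.2.1) (pvDiffWitness_get_num_frames.2.2.1) (pvDiffWitness_get_num_frames.2.2.2) ∧ D_get_num_frames (pvDiffWitness_get_num_frames.1) (pvDiffWitness_get_num_frames.2.1) (pvDiffWitness_get_num_frames.2.2.1) (pvDiffWitness_get_num_frames.2.2.2) ∧ get_num_frames (pvDiffWitness_get_num_frames.1) (pvDiffWitness_get_num_frames.2.1) (pvDiffWitness_get_num_frames.2.2.1) (pvDiffWitness_get_num_frames.2.2.2) = pvDiffWitnessOut_get_num_frames.1 ∧ get_num_frames_alt (pvDiffWitness_get_num_frames.1) (pvDiffWitness_get_num_frames.2.1) (pvDiffWitness_get_num_frames.2.2.1) (pvDiffWitness_get_num_frames.2.2.2) = pvDiffWitnessOut_get_num_frames.2 ∧ pvDiffWitnessOut_get_num_frames.1 ≠ pvDiffWitnessOut_get_num_fr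ames.2
def Claim_exact_get_num_frames : Prop := ∀ (num_samples : Int) (frame_shift_in_samples : Int) (window_size_in_samples : Int) (flush : Bool), Dom_get_num_frames num_samples frame_shift_in_samples window_size_in_samples flush → Pre_get_num_frames num_samples frame_shift_in_samples window_size_in_samples flush → D_get_num_frames num_samples frame_shift_in_samples window_size_in_samples flush → get_num_frames num_samples frame_shift_in_samples window_size_in_samples flush ≠ get_num_frames_alt num_samples frame_shift_in_samples window_size_in_samples flush

-- ===== LEMMAS AND PROOFS =====

-- with a positive shift the loop lands on the closed-form answer
theorem pvLoopA_pos_nat (ns sh c : Int) (hs : 0 < sh) :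
    ∀ (k : Nat), pvLoopA ns sh ((k : Int) + 1) (sh * (k : Int) + c) =
      if sh * (k : Int) + c ≤ ns then (k : Int) + 1
      else max 0 (PySem.Int.floordiv (ns - c) sh + 1) := by
  intro k
  induction k with
  | zero =>
      simp only [Nat.cast_zero, mul_zero, zero_add]
      by_cases h : c ≤ ns
      · rw [pvLoopA, if_neg (by omega)]; simp [h]
      · rw [if_neg (by omega), pvLoopA, if_pos ⟨by omega, by omega⟩, pvLoopA,
            if_neg (by omega)]
        have hq : PySem.Int.floordiv (ns - c) sh < 0 :=
          (PySem.Int.floordiv_lt_iff_lt_mul hs).mpr (by omega)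
        omega
  | succ m ih =>
      have hc : ((m.succ : Int)) = (m : Int) + 1 := by push_cast; ring
      rw [hc]
      have hmul : sh * ((m : Int) + 1) = sh * (m : Int) + sh := by ring
      by_cases h : sh * ((m : Int) + 1) + c ≤ ns
      · rw [pvLoopA, if_neg (by omega), if_pos h]
      · rw [if_neg h, pvLoopA, if_pos ⟨by omega, by omega⟩]
        have e1 : (m : Int) + 1 + 1 - 1 = (m : Int) + 1 := by ring
        have e2 : sh * ((m : Int) + 1) + c - sh = sh * (m : Int) + c := by ring
        rw [e1, e2, ih]
        by_cases h3 : sh * (m : Int) + c ≤ ns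
        · rw [if_pos h3]
          have hq1 : (m : Int) ≤ PySem.Int.floordiv (ns - c) sh :=
            (PySem.Int.le_floordiv_iff_mul_le hs).mpr (by rw [mul_comm]; omega)
          have hq2 : PySem.Int.floordiv (ns - c) sh < (m : Int) + 1 :=
            (PySem.Int.floordiv_lt_iff_lt_mul hs).mpr (by rw [mul_comm, hmul]; omega)
          omega
        · rw [if_neg h3]

-- ===== VERDICT (by name: the statement is the Claim_ definition above) =====
theorem get_num_frames_spec : Claim_unchanged_get_num_frames := by
  intro ns sh ws flush _ hpre hnd
  cases flush with
  | true => simp [get_num_frames, get_num_frames_alt]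
  | false =>
    have hD : ¬ (ns + PySem.Int.floordiv sh 2 < 0) := by
      intro h; exact hnd ⟨rfl, h⟩
    simp only [get_num_frames, get_num_frames_alt, first_sample_of_frame,
      Bool.false_eq_true, if_false]
    set N := PySem.Int.floordiv (ns + PySem.Int.floordiv sh 2) sh with hN
    set c := PySem.Int.floordiv sh 2 - PySem.Int.floordiv ws 2 + ws with hc
    have hN0 : 0 ≤ N := by
      rw [hN]
      exact (PySem.Int.le_floordiv_iff_mul_le hpre).mpr (by omega)
    have he : sh * (N - 1) + PySem.Int.floordiv sh 2 - PySem.Int.floordiv ws 2 + ws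
        = sh * (N - 1) + c := by rw [hc]; ring
    rw [he]
    by_cases hz : N = 0
    · rw [hz, pvLoopA, if_neg (by omega)]
      omega
    · obtain ⟨k, hk⟩ := Int.eq_ofNat_of_zero_le (by omega : (0:Int) ≤ N - 1)
      have hk1 : N = (k : Int) + 1 := by omega
      have he3 : sh * ((k : Int) + 1 - 1) + c = sh * (k : Int) + c := by ring
      rw [hk1, he3, pvLoopA_pos_nat ns sh c hpre k]
      by_cases hend : sh * (k : Int) + c ≤ ns
      · rw [if_pos hend]
        have hq1 : (k : Int) ≤ PySem.Int.floordiv (ns - c) sh :=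
          (PySem.Int.le_floordiv_iff_mul_le hpre).mpr (by rw [mul_comm]; omega)
        omega
      · rw [if_neg hend]
        have hq2 : PySem.Int.floordiv (ns - c) sh < (k : Int) :=
          (PySem.Int.floordiv_lt_iff_lt_mul hpre).mpr (by rw [mul_comm]; omega)
        omega

theorem get_num_frames_changed : Claim_changed_get_num_frames := by
  unfold Claim_changed_get_num_frames
  refine ⟨by decide, by decide, by decide, ?_, by decide, by decide⟩
  show get_num_frames (-10) 2 3 false = (-5 : Int)
  simp only [get_num_frames, first_sample_of_frame, Bool.false_eq_true, if_false]
  rw [pvLoopA]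
  decide

theorem get_num_frames_tight : Claim_exact_get_num_frames := by
  intro ns sh ws flush _ hpre hd
  obtain ⟨hf, hneg⟩ := hd
  subst hf
  have hNneg : PySem.Int.floordiv (ns + PySem.Int.floordiv sh 2) sh < 0 :=
    (PySem.Int.floordiv_lt_iff_lt_mul hpre).mpr (by omega)
  simp only [get_num_frames, get_num_frames_alt, Bool.false_eq_true, if_false]
  rw [pvLoopA, if_neg (by omega)]
  omega
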